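-- pv_equiv track=rewrite | github.com/mcoulont/LeibnizProject | Scripts/GenerateTableContents.py | order_articles
-- ===== SOURCE A (Python) =====
-- def order_articles (
--     articles_in_rocq: list[str],
--     articles_in_lean: list[str]
-- ) -> list[str]:
--     if 0 == len(articles_in_lean):
--         res = articles_in_rocq
--     else:
--         lastTermL2 = articles_in_lean[-1]
--
--         if lastTermL2 in articles_in_rocq:
--             idxLastTermL2InL1 = articles_in_rocq.index(lastTermL2)
--
--             res = order_articles(
--                 articles_in_rocq[0:idxLastTermL2InL1],
--                 articles_in_lean[:-1]
--             ) + articles_in_rocq[idxLastTermL2InL1:]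
--         else:
--             res = order_articles(articles_in_rocq, articles_in_lean[:-1]) + [lastTermL2]
--
--     return res
-- ===== SOURCE B (Python) =====
-- def order_articles (
--     articles_in_rocq: list[str],
--     articles_in_lean: list[str]
-- ) -> list[str]:
--     # First occurrence index of every rocq article, computed once.
--     first = {}
--     for i, x in enumerate(articles_in_rocq):
--         first.setdefault(x, i)
--
--     # Walk the lean list backwards with a shrinking upper bound into rocq,
--     # collecting disjoint segments back-to-front.
--     limit = len(articles_in_rocq)
--     segments = []
--     for x in reversed(articles_in_lean):
--         i = first.get(x)
--         if i is not None and i < limit: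
--             segments.append(articles_in_rocq[i:limit])
--             limit = i
--         else:
--             segments.append([x])
--     segments.append(articles_in_rocq[:limit])
--
--     res = []
--     for seg in reversed(segments):
--         res.extend(seg)
--     return res
-- ===== Notes on version B (the rewrite author's own statement) =====
-- stated objective: faster
-- what changed: Replaces A's recursion (one level per lean article, each doing `in`/`.index` linear scans and re-slicing the rocq list) with a single pass building a first-occurrence-index dict, then one backward sweep over the lean list with a shrinking limit pointer that collects disjoint rocq segments and concatenates them once.
import Mathlib
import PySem

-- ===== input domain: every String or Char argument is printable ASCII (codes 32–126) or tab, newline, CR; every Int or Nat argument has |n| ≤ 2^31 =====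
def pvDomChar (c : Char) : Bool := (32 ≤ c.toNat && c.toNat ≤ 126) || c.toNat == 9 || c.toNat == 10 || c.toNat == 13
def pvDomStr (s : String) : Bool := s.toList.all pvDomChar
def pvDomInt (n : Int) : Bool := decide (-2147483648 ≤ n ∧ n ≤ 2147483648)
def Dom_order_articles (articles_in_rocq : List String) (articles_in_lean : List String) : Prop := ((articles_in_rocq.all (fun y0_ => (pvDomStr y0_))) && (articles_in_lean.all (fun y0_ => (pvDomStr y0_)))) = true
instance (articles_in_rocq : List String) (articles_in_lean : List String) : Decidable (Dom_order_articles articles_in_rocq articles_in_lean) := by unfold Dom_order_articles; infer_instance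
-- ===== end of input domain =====

-- B replaces A's quadratic recursion (repeated `in`/`.index` scans and list re-slicing) by a
-- one-pass first-index dictionary plus a single backward sweep collecting disjoint segments.

-- ===== PORT A =====
def order_articles (articles_in_rocq : List String) (articles_in_lean : List String) : List String :=
  if _h : articles_in_lean.length = 0 then articles_in_rocq
  else
    let lastTermL2 := PySem.List.pyGetD articles_in_lean (-1) ""
    match PySem.List.index? articles_in_rocq lastTermL2 with
    | some idxLastTermL2InL1 =>
        order_articles (PySem.List.slice articles_in_rocq (some 0) (some (idxLastTermL2InL1 : Int)))
                       (PySem.List.slice articles_in_lean none (some (-1)))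
          ++ PySem.List.slice articles_in_rocq (some (idxLastTermL2InL1 : Int)) none
    | none =>
        order_articles articles_in_rocq (PySem.List.slice articles_in_lean none (some (-1)))
          ++ [lastTermL2]
  termination_by articles_in_lean.length
  decreasing_by
    all_goals simp [PySem.List.slice_to_neg_one]; omega

-- ===== PORT B =====
-- first-occurrence index of every rocq article, built once
def oaFirst (articles_in_rocq : List String) : PySem.Dict String Int :=
  (PySem.List.enumerate articles_in_rocq 0).foldl (fun d p => d.setdefault p.2 p.1) PySem.Dict.empty

def order_articles_alt (articles_in_rocq : List String) (articles_in_lean : List String) : List String :=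
  let first := oaFirst articles_in_rocq
  let st := articles_in_lean.reverse.foldl
    (fun (st : Int × List (List String)) x =>
      match first.get? x with
      | some i =>
          if i < st.1 then (i, st.2 ++ [PySem.List.slice articles_in_rocq (some i) (some st.1)])
          else (st.1, st.2 ++ [[x]])
      | none => (st.1, st.2 ++ [[x]]))
    ((articles_in_rocq.length : Int), ([] : List (List String)))
  let segments := st.2 ++ [PySem.List.slice articles_in_rocq none (some st.1)]
  segments.reverse.foldl (fun res seg => res ++ seg) []

-- ===== PRECONDITION & SPEC =====
def Spec_order_articles (articles_in_rocq : List String) (articles_in_lean : List String) (out : List String) : Prop := out = order_articles_alt articles_in_rocq articles_in_lean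
instance (articles_in_rocq : List String) (articles_in_lean : List String) (out : List String) : Decidable (Spec_order_articles articles_in_rocq articles_in_lean out) := by unfold Spec_order_articles; infer_instance

-- ===== CLAIM (what is proved, stated in full; the proofs are below) =====
def Claim_equal_order_articles : Prop := ∀ (articles_in_rocq : List String) (articles_in_lean : List String), Dom_order_articles articles_in_rocq articles_in_lean → Spec_order_articles articles_in_rocq articles_in_lean (order_articles articles_in_rocq articles_in_lean)

-- ===== LEMMAS AND PROOFS =====

-- common recursive characterisation of both programs (proof device only)
def oaCore (r : List String) : List String → Nat → List String
  | [], m => r.take m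
  | x :: rest, m =>
    match PySem.List.index? r x with
    | some i =>
        if i < m then oaCore r rest i ++ (r.drop i).take (m - i)
        else oaCore r rest m ++ [x]
    | none => oaCore r rest m ++ [x]

-- the body of B's backward sweep, named for the proofs
def oaStep (r : List String) (st : Int × List (List String)) (x : String) : Int × List (List String) :=
  match (oaFirst r).get? x with
  | some i =>
      if i < st.1 then (i, st.2 ++ [PySem.List.slice r (some i) (some st.1)])
      else (st.1, st.2 ++ [[x]])
  | none => (st.1, st.2 ++ [[x]])

theorem alt_eq_oaStep (r l : List String) :
    order_articles_alt r l =
      (let st := l.reverse.foldl (oaStep r) ((r.length : Int), ([] : List (List String)))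
       (st.2 ++ [PySem.List.slice r none (some st.1)]).reverse.foldl (fun res seg => res ++ seg) []) := rfl

-- the dictionary built by B holds exactly the first index of each element
theorem oaFirst_get?_aux (x : String) :
    ∀ (r : List String) (s : Int) (d : PySem.Dict String Int),
      ((PySem.List.enumerate r s).foldl (fun d p => d.setdefault p.2 p.1) d).get? x =
        match d.get? x with
        | some v => some v
        | none => (PySem.List.index? r x).map (fun k => s + (k : Int)) := by
  intro r
  induction r with
  | nil =>
      intro s d
      rw [PySem.List.enumerate_nil]
      simp only [List.foldl_nil]
      cases hd : d.get? x with
      | some v => simp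
      | none => simp
  | cons y t ih =>
      intro s d
      rw [PySem.List.enumerate_cons]
      simp only [List.foldl_cons]
      rw [ih (s + 1) (d.setdefault y s)]
      by_cases hxy : x = y
      · subst hxy
        rw [PySem.Dict.get?_setdefault_self]
        cases hd : d.get? x with
        | some v => simp
        | none =>
            rw [PySem.List.index?_cons_self]
            simp
      · rw [PySem.Dict.get?_setdefault_of_ne d s hxy]
        cases hd : d.get? x with
        | some v => simp
        | none =>
            rw [PySem.List.index?_cons_of_ne t (fun h => hxy h.symm)]
            cases hi : PySem.List.index? t x
            · simp
            · simp
              omega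

theorem oaFirst_get? (r : List String) (x : String) :
    (oaFirst r).get? x = (PySem.List.index? r x).map (fun k => (k : Int)) := by
  unfold oaFirst
  rw [oaFirst_get?_aux x r 0 PySem.Dict.empty]
  simp [PySem.Dict.get?_empty]

theorem oaStep_eq (r : List String) (x : String) (m : Nat) (segs : List (List String)) :
    oaStep r ((m : Int), segs) x =
      match PySem.List.index? r x with
      | some i =>
          if i < m then ((i : Int), segs ++ [PySem.List.slice r (some (i : Int)) (some (m : Int))])
          else ((m : Int), segs ++ [[x]])
      | none => ((m : Int), segs ++ [[x]]) := by
  unfold oaStep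
  rw [oaFirst_get? r x]
  cases hi : PySem.List.index? r x with
  | none => simp
  | some i => simp [Nat.cast_lt]

-- index? on a prefix: first occurrence survives truncation iff it lies inside
theorem index?_take (x : String) :
    ∀ (r : List String) (m : Nat),
      PySem.List.index? (r.take m) x =
        match PySem.List.index? r x with
        | some i => if i < m then some i else none
        | none => none := by
  intro r
  induction r with
  | nil =>
      intro m
      cases hi : PySem.List.index? ([] : List String) x <;> simp_all
  | cons y t ih =>
      intro m
      cases m with
      | zero =>
          cases hi : PySem.List.index? (y :: t) x <;> simp_all
      | succ m =>
          simp only [List.take_succ_cons]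
          by_cases hxy : y = x
          · subst hxy
            rw [PySem.List.index?_cons_self, PySem.List.index?_cons_self]
            simp
          · rw [PySem.List.index?_cons_of_ne (t.take m) hxy,
                PySem.List.index?_cons_of_ne t hxy, ih m]
            cases hi : PySem.List.index? t x with
            | none => simp
            | some i =>
                by_cases him : i < m
                · have h2 : i + 1 < m + 1 := by omega
                  simp [him, h2]
                · have h2 : ¬ i + 1 < m + 1 := by omega
                  simp [him, h2]

-- A computes oaCore on prefixes of the rocq list
theorem orderA_eq_core (r : List String) :
    ∀ (lr : List String) (m : Nat), m ≤ r.length →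
      order_articles (r.take m) lr.reverse = oaCore r lr m := by
  intro lr
  induction lr with
  | nil =>
      intro m _
      rw [order_articles]
      simp [oaCore]
  | cons x rest ih =>
      intro m hm
      rw [List.reverse_cons, order_articles]
      have hne : ¬ ((rest.reverse ++ [x]).length = 0) := by simp
      simp only [dif_neg hne, PySem.List.pyGetD_neg_one_append_singleton,
        PySem.List.slice_to_neg_one, List.dropLast_concat, index?_take x r m]
      cases hi : PySem.List.index? r x with
      | none =>
          simp only [hi, oaCore]
          rw [ih m hm]
      | some i =>
          simp only [hi, oaCore]
          by_cases him : i < m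
          · simp only [him, if_pos]
            rw [PySem.List.slice_zero_start, PySem.List.slice_to_natCast,
                PySem.List.slice_from_natCast, List.take_take,
                Nat.min_eq_left (Nat.le_of_lt him), List.drop_take,
                ih i (le_trans (Nat.le_of_lt him) hm)]
          · simp only [him, if_false]
            rw [ih m hm]

-- B's backward sweep accumulates exactly the segments oaCore appends
theorem orderB_fold (r : List String) :
    ∀ (lr : List String) (m : Nat) (segs : List (List String)), m ≤ r.length →
      (let st := lr.foldl (oaStep r) ((m : Int), segs)
       (st.2 ++ [PySem.List.slice r none (some st.1)]).reverse.foldl (fun res seg => res ++ seg) [])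
      = oaCore r lr m ++ segs.reverse.foldl (fun res seg => res ++ seg) [] := by
  intro lr
  induction lr with
  | nil =>
      intro m segs _
      simp only [List.foldl_nil, oaCore]
      rw [PySem.List.slice_to_natCast]
      simp [PySem.List.foldl_append_eq_flatMap (fun seg => seg)]
  | cons x rest ih =>
      intro m segs hm
      simp only [List.foldl_cons, oaStep_eq]
      cases hi : PySem.List.index? r x with
      | none =>
          rw [ih m (segs ++ [[x]]) hm]
          simp only [oaCore, hi]
          simp [PySem.List.foldl_append_eq_flatMap (fun seg => seg)]
      | some i =>
          have hil : i < r.length := by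
            rcases PySem.List.getElem_of_index?_eq_some hi with ⟨hk, -⟩
            exact hk
          by_cases him : i < m
          · simp only [him, if_pos]
            rw [ih i (segs ++ [PySem.List.slice r (some (i:Int)) (some (m:Int))]) (Nat.le_of_lt hil)]
            simp only [oaCore, hi, him, if_pos]
            rw [PySem.List.slice_natCast]
            simp [PySem.List.foldl_append_eq_flatMap (fun seg => seg)]
          · simp only [him, if_false]
            rw [ih m (segs ++ [[x]]) hm]
            simp only [oaCore, hi, him, if_false]
            simp [PySem.List.foldl_append_eq_flatMap (fun seg => seg)]

-- ===== VERDICT (by name: the statement is the Claim_ definition above) =====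
theorem order_articles_spec : Claim_equal_order_articles := by
  intro r l _
  simp only [Spec_order_articles]
  have hA : order_articles r l = oaCore r l.reverse r.length := by
    have h := orderA_eq_core r l.reverse r.length le_rfl
    rwa [List.take_length, List.reverse_reverse] at h
  have hB : order_articles_alt r l = oaCore r l.reverse r.length := by
    rw [alt_eq_oaStep]
    have h := orderB_fold r l.reverse r.length [] le_rfl
    simpa using h
  rw [hA, hB]
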